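-- pv_equiv track=rewrite | github.com/tacowasabii/online-judge | 프로그래머스/0/181834. l로 만들기/l로 만들기.py | solution
-- ===== SOURCE A (Python) =====
-- def solution(myString):
--     ans = ''
--     for i in myString:
--         if ord(i) < ord('l'):
--             ans += 'l'
--         else:
--             ans += i
--     return ans
-- ===== SOURCE B (Python) =====
-- def solution(myString):
--     table = {cp: 'l' for cp in range(ord('l'))}
--     return myString.translate(table)
-- ===== Notes on version B (the rewrite author's own statement) =====
-- stated objective: faster
-- what changed: Replaces the explicit per-character loop with if/else and repeated string concatenation by a precomputed translation table applied in one str.translate pass.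
import Mathlib
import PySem

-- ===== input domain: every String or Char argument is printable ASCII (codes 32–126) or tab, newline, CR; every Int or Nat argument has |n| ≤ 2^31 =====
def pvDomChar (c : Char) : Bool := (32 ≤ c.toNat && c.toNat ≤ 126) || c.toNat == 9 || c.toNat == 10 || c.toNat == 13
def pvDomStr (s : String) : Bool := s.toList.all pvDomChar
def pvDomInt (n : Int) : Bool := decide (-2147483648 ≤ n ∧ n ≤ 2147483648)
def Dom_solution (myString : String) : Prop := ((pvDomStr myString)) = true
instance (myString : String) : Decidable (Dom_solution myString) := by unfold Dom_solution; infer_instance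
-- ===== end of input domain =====

-- B replaces A's per-character loop with a translation table consulted by a single translate pass (idiomatic).

-- ===== PORT A =====
def solution (myString : String) : String :=
  myString.toList.foldl
    (fun ans i => if i.toNat < ('l').toNat then ans.push 'l' else ans.push i) ""

-- ===== PORT B =====
-- table = {cp: 'l' for cp in range(ord('l'))}
def lTable : PySem.Dict Int Char :=
  (PySem.List.pyRange 0 108 1).foldl (fun d cp => d.insert cp 'l') PySem.Dict.empty

-- myString.translate(table): each char is looked up by codepoint, absent keys pass through
def solution_alt (myString : String) : String :=
  String.ofList (myString.toList.map (fun c => (lTable.get? (c.toNat : Int)).getD c))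

-- ===== PRECONDITION & SPEC =====
def Spec_solution (myString : String) (out : String) : Prop := out = solution_alt myString
instance (myString : String) (out : String) : Decidable (Spec_solution myString out) := by unfold Spec_solution; infer_instance

-- ===== CLAIM (what is proved, stated in full; the proofs are below) =====
def Claim_equal_solution : Prop := ∀ (myString : String), Dom_solution myString → Spec_solution myString (solution myString)

-- ===== LEMMAS AND PROOFS =====

theorem tbl_get (n : ℕ) (k : Int) :
    (((List.range n).map (fun j => ((0:Int) + j))).foldl
        (fun d cp => d.insert cp 'l') PySem.Dict.empty).get? k
      = if 0 ≤ k ∧ k < n then some 'l' else none := by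
  induction n with
  | zero => simp [PySem.Dict.get?_empty]
  | succ n ih =>
      have hs : (List.range (n+1)).map (fun j => ((0:Int) + j))
          = (List.range n).map (fun j => ((0:Int) + j)) ++ [((0:Int) + n)] := by
        simp [List.range_succ]
      rw [hs, List.foldl_append, List.foldl_cons, List.foldl_nil, PySem.Dict.get?_insert, ih]
      split_ifs with h1 h2 h2 h3 h3 <;> first | rfl | omega

theorem lTable_get (k : Int) : lTable.get? k = if 0 ≤ k ∧ k < 108 then some 'l' else none := by
  rw [lTable, PySem.List.pyRange_one]
  exact tbl_get 108 k

theorem solution_fold (l : List Char) (ans : String) :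
    (l.foldl (fun ans i => if i.toNat < ('l').toNat then ans.push 'l' else ans.push i) ans).toList
      = ans.toList ++ l.map (fun c => if c.toNat < 108 then 'l' else c) := by
  induction l generalizing ans with
  | nil => simp
  | cons c t ih =>
      simp only [List.foldl_cons, List.map_cons]
      by_cases h : c.toNat < 108
      · rw [if_pos (show c.toNat < ('l').toNat from h), if_pos h, ih, String.toList_push]; simp
      · rw [if_neg (show ¬ c.toNat < ('l').toNat from h), if_neg h, ih, String.toList_push]; simp

-- ===== VERDICT (by name: the statement is the Claim_ definition above) =====
theorem solution_spec : Claim_equal_solution := by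
  intro s _
  show solution s = solution_alt s
  apply String.toList_inj.mp
  rw [solution, solution_alt, solution_fold]
  simp only [String.toList_ofList]
  apply List.map_congr_left
  intro c _
  rw [lTable_get]
  split_ifs with h1 h2 h2 <;> first | rfl | omega
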